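-- pv_equiv track=rewrite | github.com/malkhalaf/vcprompt | vcprompt.py | sorted_alpha
-- ===== SOURCE A (Python) =====
-- def sorted_alpha(sortme, unique=False):
--     upper = [x for x in sortme if x.isupper()]
--     lower = [x for x in sortme if x.islower()]
--     digit = [x for x in sortme if x.isdigit()]
--     if unique:
--         upper = list(set(upper))
--         lower = list(set(lower))
--         digit = list(set(digit))
--     return lower + upper + digit
-- ===== SOURCE B (Python) =====
-- def sorted_alpha(sortme, unique=False):
--     lower, upper, digit = [], [], []
--     for x in sortme:
--         if x.isupper():
--             upper.append(x)
--         elif x.islower():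
--             lower.append(x)
--         elif x.isdigit():
--             digit.append(x)
--     if unique:
--         lower = list(set(lower))
--         upper = list(set(upper))
--         digit = list(set(digit))
--     return lower + upper + digit
-- ===== Notes on version B (the rewrite author's own statement) =====
-- stated objective: alternative
-- what changed: A makes three separate filter passes over sortme (one per category); B makes a single pass with an if/elif dispatch appending each string to one of three accumulator lists, then dedupes and concatenates exactly as A does.
import Mathlib
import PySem

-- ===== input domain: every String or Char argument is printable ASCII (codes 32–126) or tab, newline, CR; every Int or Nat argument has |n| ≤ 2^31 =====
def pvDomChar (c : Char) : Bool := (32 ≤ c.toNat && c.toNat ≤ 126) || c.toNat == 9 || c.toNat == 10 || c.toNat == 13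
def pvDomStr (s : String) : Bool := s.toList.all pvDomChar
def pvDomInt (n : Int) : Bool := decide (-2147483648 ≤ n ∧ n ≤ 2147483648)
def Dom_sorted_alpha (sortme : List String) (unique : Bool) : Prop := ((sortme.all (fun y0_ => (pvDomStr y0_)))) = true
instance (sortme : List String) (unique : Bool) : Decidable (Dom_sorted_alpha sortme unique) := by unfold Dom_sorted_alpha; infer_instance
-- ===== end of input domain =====

-- B replaces A's three filter passes over sortme by a single dispatch loop with three accumulators (alternative decomposition, same cost).


-- ===== PORT A =====
-- Python str.isupper(): at least one cased character and no lowercase one (exact on the ASCII domain, where cased = alphabetic)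
def pyStrIsupper (s : String) : Bool :=
  s.toList.any (fun c => PySem.Chars.isalpha c) && s.toList.all (fun c => !PySem.Chars.islower c)
-- Python str.islower(): at least one cased character and no uppercase one (exact on the ASCII domain)
def pyStrIslower (s : String) : Bool :=
  s.toList.any (fun c => PySem.Chars.isalpha c) && s.toList.all (fun c => !PySem.Chars.isupper c)

def sorted_alpha (sortme : List String) (unique : Bool) : List String :=
  let upper := sortme.filter (fun x => pyStrIsupper x)
  let lower := sortme.filter (fun x => pyStrIslower x)
  let digit := sortme.filter (fun x => PySem.Str.strIsdigit x)
  -- list(set(...)) ported as PySem.Set.ofList (first-occurrence dedup; CPython iterates a set in hash order)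
  if unique then
    PySem.Set.ofList lower ++ PySem.Set.ofList upper ++ PySem.Set.ofList digit
  else
    lower ++ upper ++ digit

-- ===== PORT B =====
def sorted_alpha_alt (sortme : List String) (unique : Bool) : List String :=
  let acc := sortme.foldl
    (fun (acc : List String × List String × List String) x =>
      match acc with
      | (low, up, dig) =>
        if pyStrIsupper x then (low, up ++ [x], dig)
        else if pyStrIslower x then (low ++ [x], up, dig)
        else if PySem.Str.strIsdigit x then (low, up, dig ++ [x])
        else (low, up, dig))
    ([], [], [])
  match acc with
  | (low, up, dig) =>
    if unique then
      PySem.Set.ofList low ++ PySem.Set.ofList up ++ PySem.Set.ofList dig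
    else
      low ++ up ++ dig

-- ===== PRECONDITION & SPEC =====
def Spec_sorted_alpha (sortme : List String) (unique : Bool) (out : List String) : Prop := out = sorted_alpha_alt sortme unique
instance (sortme : List String) (unique : Bool) (out : List String) : Decidable (Spec_sorted_alpha sortme unique out) := by unfold Spec_sorted_alpha; infer_instance

-- ===== CLAIM (what is proved, stated in full; the proofs are below) =====
def Claim_equal_sorted_alpha : Prop := ∀ (sortme : List String) (unique : Bool), Dom_sorted_alpha sortme unique → Spec_sorted_alpha sortme unique (sorted_alpha sortme unique)

-- ===== LEMMAS AND PROOFS =====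

theorem char_isdigit_not_isalpha (c : Char) (h : PySem.Chars.isdigit c = true) :
    PySem.Chars.isalpha c = false := by
  simp only [PySem.Chars.isdigit, PySem.Chars.isalpha, PySem.Chars.isupper, PySem.Chars.islower,
    Bool.and_eq_true, Bool.or_eq_false_iff, Bool.and_eq_false_iff, decide_eq_true_eq,
    decide_eq_false_iff_not, Char.le_def, UInt32.le_iff_toNat_le,
    show ('0':Char).val.toNat = 48 from rfl, show ('9':Char).val.toNat = 57 from rfl,
    show ('A':Char).val.toNat = 65 from rfl, show ('Z':Char).val.toNat = 90 from rfl,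
    show ('a':Char).val.toNat = 97 from rfl, show ('z':Char).val.toNat = 122 from rfl] at h ⊢
  omega

theorem not_islower_and_isupper (s : String) (hl : pyStrIslower s = true)
    (hu : pyStrIsupper s = true) : False := by
  unfold pyStrIslower at hl
  unfold pyStrIsupper at hu
  simp only [Bool.and_eq_true, List.any_eq_true, List.all_eq_true, Bool.not_eq_true'] at hl hu
  obtain ⟨⟨c, hc, ha⟩, hnotup⟩ := hl
  have h1 : PySem.Chars.isupper c = false := hnotup c hc
  have h2 : PySem.Chars.islower c = false := hu.2 c hc
  simp only [PySem.Chars.isalpha, Bool.or_eq_true, h1, h2, or_self] at ha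
  exact Bool.false_ne_true ha

theorem not_isdigit_and_any_alpha (s : String) (hd : PySem.Chars.strIsdigit s.toList = true)
    (ha : s.toList.any (fun c => PySem.Chars.isalpha c) = true) : False := by
  unfold PySem.Chars.strIsdigit at hd
  simp only [Bool.and_eq_true, List.all_eq_true, List.any_eq_true] at hd ha
  obtain ⟨c, hc, hca⟩ := ha
  rw [char_isdigit_not_isalpha c (hd.2 c hc)] at hca
  exact Bool.false_ne_true hca

theorem isupper_not_islower (s : String) (h : pyStrIsupper s = true) :
    pyStrIslower s = false := by
  cases hx : pyStrIslower s with
  | false => rfl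
  | true => exact absurd (not_islower_and_isupper s hx h) not_false

theorem isupper_not_isdigit (s : String) (h : pyStrIsupper s = true) :
    PySem.Str.strIsdigit s = false := by
  unfold PySem.Str.strIsdigit
  cases hx : PySem.Chars.strIsdigit s.toList with
  | false => rfl
  | true =>
    unfold pyStrIsupper at h
    simp only [Bool.and_eq_true] at h
    exact absurd (not_isdigit_and_any_alpha s hx h.1) not_false

theorem islower_not_isdigit (s : String) (h : pyStrIslower s = true) :
    PySem.Str.strIsdigit s = false := by
  unfold PySem.Str.strIsdigit
  cases hx : PySem.Chars.strIsdigit s.toList with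
  | false => rfl
  | true =>
    unfold pyStrIslower at h
    simp only [Bool.and_eq_true] at h
    exact absurd (not_isdigit_and_any_alpha s hx h.1) not_false

/-- B's dispatch loop computes exactly A's three filters, appended to the accumulators. -/
theorem fold_spec (xs : List String) (l u d : List String) :
    xs.foldl
      (fun (acc : List String × List String × List String) x =>
        match acc with
        | (low, up, dig) =>
          if pyStrIsupper x then (low, up ++ [x], dig)
          else if pyStrIslower x then (low ++ [x], up, dig)
          else if PySem.Str.strIsdigit x then (low, up, dig ++ [x])
          else (low, up, dig))
      (l, u, d)
    = (l ++ xs.filter (fun x => pyStrIslower x),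
       u ++ xs.filter (fun x => pyStrIsupper x),
       d ++ xs.filter (fun x => PySem.Str.strIsdigit x)) := by
  induction xs generalizing l u d with
  | nil => simp
  | cons x xs ih =>
    simp only [List.foldl_cons, List.filter_cons]
    by_cases hu : pyStrIsupper x = true
    · have hl : pyStrIslower x = false := isupper_not_islower x hu
      have hd : PySem.Str.strIsdigit x = false := isupper_not_isdigit x hu
      simp only [hu, hl, hd, if_true, Bool.false_eq_true, if_false]
      rw [ih]
      simp
    · have hu' : pyStrIsupper x = false := Bool.eq_false_iff.mpr hu
      by_cases hl : pyStrIslower x = true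
      · have hd : PySem.Str.strIsdigit x = false := islower_not_isdigit x hl
        simp only [hu', hl, hd, if_true, Bool.false_eq_true, if_false]
        rw [ih]
        simp
      · have hl' : pyStrIslower x = false := Bool.eq_false_iff.mpr hl
        by_cases hd : PySem.Str.strIsdigit x = true
        · simp only [hu', hl', hd, if_true, Bool.false_eq_true, if_false]
          rw [ih]
          simp
        · have hd' : PySem.Str.strIsdigit x = false := Bool.eq_false_iff.mpr hd
          simp only [hu', hl', hd', Bool.false_eq_true, if_false]
          rw [ih]

-- ===== VERDICT (by name: the statement is the Claim_ definition above) =====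
theorem sorted_alpha_spec : Claim_equal_sorted_alpha := by
  intro sortme unique _
  unfold Spec_sorted_alpha sorted_alpha sorted_alpha_alt
  rw [fold_spec]
  simp
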